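-- pv_equiv track=rewrite | github.com/Josedlz/BD2-lab | IndexInverter.py | queryOR
-- ===== SOURCE A (Python) =====
-- def queryOR(A, B):
--     i = 0
--     j = 0
--     result = []
--     while i < len(A) and j < len(B):
--         if A[i] < B[j]:
--             result.append(A[i])
--             i += 1
--         else:
--             result.append(B[j])
--             j += 1
--
--     while i < len(A):
--         if not result:
--             result.append(A[i])
--         if A[i] != result[-1]:
--             result.append(A[i])
--         i += 1
--
--     while j < len(B):
--         if not result:
--             result.append(B[j])
--         elif B[j] != result[-1]:
--             result.append(B[j])
--         j += 1
--
--     result = sorted(set(result))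
--     return result
-- ===== SOURCE B (Python) =====
-- def queryOR(A, B):
--     return sorted(set(A) | set(B))
-- ===== Notes on version B (the rewrite author's own statement) =====
-- stated objective: simpler
-- what changed: A's two-pointer merge with last-element dedup is redundant with its final sorted(set(...)); B drops the merge loops entirely and returns sorted(set(A)|set(B)) directly.
import Mathlib
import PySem

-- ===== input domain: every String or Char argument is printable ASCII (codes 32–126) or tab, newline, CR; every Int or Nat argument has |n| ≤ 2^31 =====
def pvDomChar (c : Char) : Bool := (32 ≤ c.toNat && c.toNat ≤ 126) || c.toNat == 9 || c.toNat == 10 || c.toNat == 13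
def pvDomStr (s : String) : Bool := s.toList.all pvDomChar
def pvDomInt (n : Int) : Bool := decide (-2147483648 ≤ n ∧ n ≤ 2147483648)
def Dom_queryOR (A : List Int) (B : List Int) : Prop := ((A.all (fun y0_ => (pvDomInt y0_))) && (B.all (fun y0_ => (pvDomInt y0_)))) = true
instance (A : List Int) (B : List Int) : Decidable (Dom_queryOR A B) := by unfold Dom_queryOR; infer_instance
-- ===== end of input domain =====

-- B drops A's redundant two-pointer merge loops (their dedup-against-last is subsumed by the
-- final sorted(set(...))) and returns sorted(set(A)|set(B)) directly; objective: simpler.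

-- ===== PORT A =====
-- first while loop: i/j cursors become suffix recursion; returns (result, A-tail, B-tail)
def pvMerge : List Int → List Int → List Int → List Int × List Int × List Int
  | a :: as, b :: bs, r =>
      if a < b then pvMerge as (b :: bs) (r ++ [a])
      else pvMerge (a :: as) bs (r ++ [b])
  | as, bs, r => (r, as, bs)

-- second while loop (two separate ifs, as in the Python)
def pvTailA : List Int → List Int → List Int
  | [], r => r
  | a :: rest, r =>
      let r1 := if r = [] then r ++ [a] else r
      let r2 := if r1.getLast? ≠ some a then r1 ++ [a] else r1
      pvTailA rest r2

-- third while loop (if/elif)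
def pvTailB : List Int → List Int → List Int
  | [], r => r
  | b :: rest, r =>
      if r = [] then pvTailB rest (r ++ [b])
      else if r.getLast? ≠ some b then pvTailB rest (r ++ [b])
      else pvTailB rest r

def queryOR (A : List Int) (B : List Int) : List Int :=
  let m := pvMerge A B []
  let r := pvTailA m.2.1 m.1
  let r := pvTailB m.2.2 r
  PySem.List.sorted (PySem.Set.ofList r) (fun x => x) false

-- ===== PORT B =====
def queryOR_alt (A : List Int) (B : List Int) : List Int :=
  PySem.List.sorted (PySem.Set.union (PySem.Set.ofList A) B) (fun x => x) false

-- ===== PRECONDITION & SPEC =====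
def Spec_queryOR (A : List Int) (B : List Int) (out : List Int) : Prop := out = queryOR_alt A B
instance (A : List Int) (B : List Int) (out : List Int) : Decidable (Spec_queryOR A B out) := by unfold Spec_queryOR; infer_instance

-- ===== CLAIM (what is proved, stated in full; the proofs are below) =====
def Claim_equal_queryOR : Prop := ∀ (A : List Int) (B : List Int), Dom_queryOR A B → Spec_queryOR A B (queryOR A B)

-- ===== LEMMAS AND PROOFS =====

theorem mem_pvMerge (A B r : List Int) (x : Int) :
    (x ∈ (pvMerge A B r).1 ∨ x ∈ (pvMerge A B r).2.1 ∨ x ∈ (pvMerge A B r).2.2) ↔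
      (x ∈ r ∨ x ∈ A ∨ x ∈ B) := by
  fun_induction pvMerge A B r with
  | case1 a as b bs r h ih => simp_all [List.mem_append]; tauto
  | case2 a as b bs r h ih => simp_all [List.mem_append]; tauto
  | case3 as bs r h => tauto

theorem mem_pvTailA (as r : List Int) (x : Int) :
    x ∈ pvTailA as r ↔ x ∈ r ∨ x ∈ as := by
  fun_induction pvTailA as r with
  | case1 r => simp
  | case2 a rest r r1 r2 ih =>
      have hmem : x ∈ r2 ↔ x ∈ r ∨ x = a := by
        by_cases hr : r = []
        · subst hr; simp [r2, r1]
        · simp only [r2, r1, if_neg hr]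
          by_cases hl : r.getLast? ≠ some a
          · simp [if_pos hl, List.mem_append]
          · rw [not_ne_iff] at hl
            have ha : a ∈ r := List.mem_of_getLast? hl
            rw [hl, if_neg (by simp)]
            exact ⟨Or.inl, fun h => h.elim id (fun he => by rw [he]; exact ha)⟩
      rw [ih, hmem]
      simp only [List.mem_cons]
      tauto

theorem mem_pvTailB (bs r : List Int) (x : Int) :
    x ∈ pvTailB bs r ↔ x ∈ r ∨ x ∈ bs := by
  fun_induction pvTailB bs r with
  | case1 r => simp
  | case2 b rest ih => simp_all
  | case3 b rest r h1 h2 ih => simp_all [List.mem_append]; tauto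
  | case4 b rest r h1 h2 ih =>
      rw [ih]
      rw [not_ne_iff] at h2
      have hb : b ∈ r := List.mem_of_getLast? h2
      simp only [List.mem_cons]
      exact ⟨fun h => h.elim Or.inl (fun h => Or.inr (Or.inr h)),
        fun h => h.elim Or.inl (fun h => h.elim (fun he => Or.inl (he ▸ hb)) Or.inr)⟩

-- ===== VERDICT (by name: the statement is the Claim_ definition above) =====
theorem queryOR_spec : Claim_equal_queryOR := by
  intro A B _
  unfold Spec_queryOR queryOR queryOR_alt
  apply PySem.List.sorted_eq_sorted_of_perm
  · exact fun a b h => h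
  · rw [List.perm_ext_iff_of_nodup (PySem.Set.nodup_ofList _)
      (PySem.Set.nodup_union _ _ (PySem.Set.nodup_ofList _))]
    intro x
    rw [PySem.Set.mem_ofList, PySem.Set.mem_union, PySem.Set.mem_ofList,
      mem_pvTailB, mem_pvTailA]
    have := mem_pvMerge A B [] x
    simp at this
    tauto
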